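-- pv_equiv track=rewrite | github.com/kh277/BOJ | 백준/Silver/24464. 득수 밥 먹이기/득수 밥 먹이기.py | solve
-- ===== SOURCE A (Python) =====
-- MOD = 1000000007
--
-- def solve(N):
--     prevDP = [1, 1, 1, 1, 1]
--
--     for _ in range(1, N):
--         curDP = [(prevDP[1] + prevDP[2] + prevDP[3] + prevDP[4]) % MOD,
--                 (prevDP[0] + prevDP[3] + prevDP[4]) % MOD,
--                 (prevDP[0] + prevDP[4]) % MOD,
--                 (prevDP[0] + prevDP[1]) % MOD,
--                 (prevDP[0] + prevDP[1] + prevDP[2]) % MOD]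
--         prevDP = curDP
--
--     return sum(prevDP) % MOD
-- ===== SOURCE B (Python) =====
-- MOD = 1000000007
--
-- def solve(N):
--     # The total count S_k for k days satisfies the order-3 scalar linear
--     # recurrence S_k = S_{k-1} + 5*S_{k-2} + 2*S_{k-3} (characteristic
--     # polynomial of the 5-state transition), so track 3 numbers, not a 5-list.
--     if N <= 1:
--         return 5
--     if N == 2:
--         return 14
--     s1, s2, s3 = 42, 14, 5
--     for _ in range(3, N):
--         s1, s2, s3 = (s1 + 5 * s2 + 2 * s3) % MOD, s1, s2
--     return s1
-- ===== Notes on version B (the rewrite author's own statement) =====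
-- stated objective: simpler
-- what changed: Replaces the 5-state vector DP (rebuilding a 5-element list with 13 additions per step) by the order-3 scalar linear recurrence S_k = S_{k-1} + 5*S_{k-2} + 2*S_{k-3} satisfied by the answer itself, tracking just three integers.
import Mathlib
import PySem

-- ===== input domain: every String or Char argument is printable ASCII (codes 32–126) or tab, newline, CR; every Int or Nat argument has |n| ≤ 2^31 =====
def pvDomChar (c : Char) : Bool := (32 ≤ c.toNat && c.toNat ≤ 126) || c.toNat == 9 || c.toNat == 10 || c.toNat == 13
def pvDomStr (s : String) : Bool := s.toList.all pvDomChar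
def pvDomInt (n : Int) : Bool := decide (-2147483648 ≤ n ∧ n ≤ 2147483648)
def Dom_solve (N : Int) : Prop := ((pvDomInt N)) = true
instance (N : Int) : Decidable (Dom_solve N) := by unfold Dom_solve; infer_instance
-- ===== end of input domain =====

-- B replaces the 5-state vector DP by the order-3 scalar recurrence the answer
-- satisfies (S_k = S_{k-1} + 5*S_{k-2} + 2*S_{k-3}), tracking three integers.

def pvMOD : Int := 1000000007

-- ===== PORT A =====
-- one body of A's for-loop: the new 5-element DP list (each entry % MOD)
def pvStepA (p : List Int) : List Int :=
  [PySem.Int.mod (PySem.List.pyGetD p 1 0 + PySem.List.pyGetD p 2 0 + PySem.List.pyGetD p 3 0 + PySem.List.pyGetD p 4 0) pvMOD,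
   PySem.Int.mod (PySem.List.pyGetD p 0 0 + PySem.List.pyGetD p 3 0 + PySem.List.pyGetD p 4 0) pvMOD,
   PySem.Int.mod (PySem.List.pyGetD p 0 0 + PySem.List.pyGetD p 4 0) pvMOD,
   PySem.Int.mod (PySem.List.pyGetD p 0 0 + PySem.List.pyGetD p 1 0) pvMOD,
   PySem.Int.mod (PySem.List.pyGetD p 0 0 + PySem.List.pyGetD p 1 0 + PySem.List.pyGetD p 2 0) pvMOD]

def solve (N : Int) : Int :=
  PySem.Int.mod
    (((PySem.List.pyRange 1 N 1).foldl (fun p _ => pvStepA p) [1, 1, 1, 1, 1]).foldl (· + ·) 0)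
    pvMOD

-- ===== PORT B =====
-- one body of B's for-loop on the triple (s1, s2, s3)
def pvStepB (s : Int × Int × Int) : Int × Int × Int :=
  (PySem.Int.mod (s.1 + 5 * s.2.1 + 2 * s.2.2) pvMOD, s.1, s.2.1)

def solve_alt (N : Int) : Int :=
  if N ≤ 1 then 5
  else if N = 2 then 14
  else ((PySem.List.pyRange 3 N 1).foldl (fun s _ => pvStepB s) (42, 14, 5)).1

-- ===== PRECONDITION & SPEC =====
def Spec_solve (N : Int) (out : Int) : Prop := out = solve_alt N
instance (N : Int) (out : Int) : Decidable (Spec_solve N out) := by unfold Spec_solve; infer_instance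

-- ===== CLAIM (what is proved, stated in full; the proofs are below) =====
def Claim_equal_solve : Prop := ∀ (N : Int), Dom_solve N → Spec_solve N (solve N)

-- ===== LEMMAS AND PROOFS =====

-- the ideal (mod-free) 5-state transition and its orbit
def pvIStep (v : Int × Int × Int × Int × Int) : Int × Int × Int × Int × Int :=
  (v.2.1 + v.2.2.1 + v.2.2.2.1 + v.2.2.2.2,
   v.1 + v.2.2.2.1 + v.2.2.2.2,
   v.1 + v.2.2.2.2,
   v.1 + v.2.1,
   v.1 + v.2.1 + v.2.2.1)

def pvIVec : Nat → Int × Int × Int × Int × Int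
  | 0 => (1, 1, 1, 1, 1)
  | k + 1 => pvIStep (pvIVec k)

def pvSum5 (v : Int × Int × Int × Int × Int) : Int :=
  v.1 + v.2.1 + v.2.2.1 + v.2.2.2.1 + v.2.2.2.2

def pvS (k : Nat) : Int := pvSum5 (pvIVec k)

lemma pvMOD_pos : (0 : Int) < pvMOD := by norm_num [pvMOD]

lemma pvmod_eq (a : Int) : PySem.Int.mod a pvMOD = a % pvMOD :=
  PySem.Int.mod_eq_emod_of_pos pvMOD_pos

lemma pvh (a : Int) : a % pvMOD ≡ a [ZMOD pvMOD] :=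
  Int.emod_emod_of_dvd a dvd_rfl

-- folding a loop whose body ignores the counter is function iteration
lemma pvFoldl_iterate {α β : Type} (f : α → α) :
    ∀ (l : List β) (s : α), l.foldl (fun p _ => f p) s = f^[l.length] s := by
  intro l
  induction l with
  | nil => intro s; rfl
  | cons x xs ih =>
      intro s
      simp [List.foldl, ih, Function.iterate_succ_apply]

-- the order-3 recurrence: a `ring` identity on the mod-free orbit
lemma pvS_rec (k : Nat) : pvS (k + 3) = pvS (k + 2) + 5 * pvS (k + 1) + 2 * pvS k := by
  show pvSum5 (pvIVec (k+3)) = _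
  simp only [pvS, pvIVec, pvIStep, pvSum5]
  ring

-- A's DP list after k iterations is the ideal 5-vector reduced entrywise
lemma pvA_state (k : Nat) :
    pvStepA^[k] [1, 1, 1, 1, 1] =
      [(pvIVec k).1 % pvMOD, (pvIVec k).2.1 % pvMOD, (pvIVec k).2.2.1 % pvMOD,
       (pvIVec k).2.2.2.1 % pvMOD, (pvIVec k).2.2.2.2 % pvMOD] := by
  induction k with
  | zero => simp [pvIVec]; decide
  | succ k ih =>
      rw [Function.iterate_succ_apply', ih]
      simp only [pvStepA, pvIVec, pvIStep, pvmod_eq]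
      simp only [PySem.List.pyGetD, PySem.List.pyGet?, PySem.List.pyIdx?]
      simp only [show ((4:Int).toNat)=4 from rfl, show ((3:Int).toNat)=3 from rfl,
        show ((2:Int).toNat)=2 from rfl, show ((1:Int).toNat)=1 from rfl,
        show ((0:Int).toNat)=0 from rfl,
        List.cons.injEq, and_true]
      refine ⟨?_, ?_, ?_, ?_, ?_⟩
      · exact ((((pvh _).add (pvh _)).add (pvh _)).add (pvh _))
      · exact (((pvh _).add (pvh _)).add (pvh _))
      · exact ((pvh _).add (pvh _))
      · exact ((pvh _).add (pvh _))
      · exact (((pvh _).add (pvh _)).add (pvh _))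

-- B's triple after k iterations holds three consecutive reduced answers
lemma pvB_state (k : Nat) :
    pvStepB^[k] ((42 : Int), (14 : Int), (5 : Int)) =
      (pvS (k + 2) % pvMOD, pvS (k + 1) % pvMOD, pvS k % pvMOD) := by
  induction k with
  | zero => decide
  | succ k ih =>
      rw [Function.iterate_succ_apply', ih]
      simp only [pvStepB, pvmod_eq]
      refine Prod.ext ?_ (Prod.ext rfl rfl)
      show (pvS (k+2) % pvMOD + 5 * (pvS (k+1) % pvMOD) + 2 * (pvS k % pvMOD)) % pvMOD
        = pvS (k + 1 + 2) % pvMOD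
      have : pvS (k + 1 + 2) = pvS (k+2) + 5 * pvS (k+1) + 2 * pvS k := by
        have := pvS_rec k; omega
      rw [this]
      exact ((pvh _).add ((pvh _).mul_left 5)).add ((pvh _).mul_left 2)

-- A's return value is S_{(N-1)} reduced, for any N (N ≤ 1 gives 0 iterations)
lemma pvSolve_eq (N : Int) : solve N = pvS (N - 1).toNat % pvMOD := by
  unfold solve
  rw [pvFoldl_iterate, PySem.List.length_pyRange_one, pvA_state]
  simp only [List.foldl, pvmod_eq, zero_add]
  exact ((((pvh _).add (pvh _)).add (pvh _)).add (pvh _)).add (pvh _)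

theorem pv_main (N : Int) : solve N = solve_alt N := by
  rw [pvSolve_eq]
  unfold solve_alt
  split_ifs with h1 h2
  · -- N ≤ 1 : zero iterations, S 0 = 5
    rw [show (N - 1).toNat = 0 by omega]
    decide
  · -- N = 2
    rw [h2]; decide
  · -- N ≥ 3
    rw [pvFoldl_iterate, PySem.List.length_pyRange_one, pvB_state]
    have : (N - 3).toNat + 2 = (N - 1).toNat := by omega
    rw [this]

-- ===== VERDICT (by name: the statement is the Claim_ definition above) =====
theorem solve_spec : Claim_equal_solve := by
  intro N _
  show solve N = solve_alt N
  exact pv_main N
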